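-- pv_equiv track=rewrite | github.com/sysfce2/python-fonttools | Lib/fontTools/cffLib/specializer.py | vhcurveto
-- ===== SOURCE A (Python) =====
-- def _everyN(el, n):
-- 	"""Group the list el into groups of size n"""
-- 	if len(el) % n != 0: raise ValueError(args)
-- 	for i in range(0, len(el), n):
-- 		yield el[i:i+n]
--
-- def vhcurveto(args):
-- 	if len(args) < 4 or len(args) % 8 not in {0,1,4,5}: raise ValueError(args)
-- 	last_args = None
-- 	if len(args) % 2 == 1:
-- 		lastStraight = len(args) % 8 == 5
-- 		args, last_args = args[:-5], args[-5:]
-- 	it = _everyN(args, 4)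
-- 	try:
-- 		while True:
-- 			args = next(it)
-- 			yield ('rrcurveto', [0, args[0], args[1], args[2], args[3], 0])
-- 			args = next(it)
-- 			yield ('rrcurveto', [args[0], 0, args[1], args[2], 0, args[3]])
-- 	except StopIteration:
-- 		pass
-- 	if last_args:
-- 		args = last_args
-- 		if lastStraight:
-- 			yield ('rrcurveto', [0, args[0], args[1], args[2], args[3], args[4]])
-- 		else:
-- 			yield ('rrcurveto', [args[0], 0, args[1], args[2], args[4], args[3]])
-- ===== SOURCE B (Python) =====
-- _TPL = (
--     (None, 0, 1, 2, 3, None),  # 4-group at even position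
--     (0, None, 1, 2, None, 3),  # 4-group at odd position
--     (None, 0, 1, 2, 3, 4),     # straight 5-element tail
--     (0, None, 1, 2, 4, 3),     # curving 5-element tail
-- )
--
--
-- def vhcurveto(args):
--     n = len(args)
--     if n < 4 or n % 8 not in {0, 1, 4, 5}:
--         raise ValueError(args)
--     # Stage 1: build the whole plan arithmetically, as (offset, template-id) pairs.
--     plan = [(4 * i, i % 2) for i in range((n - n % 2 * 5) // 4)]
--     if n % 2:
--         plan.append((n - 5, 2 if n % 8 == 5 else 3))
--     # Stage 2: render each planned operation by direct indexing into args.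
--     for off, t in plan:
--         yield ('rrcurveto', [0 if j is None else args[off + j] for j in _TPL[t]])
-- ===== Notes on version B (the rewrite author's own statement) =====
-- stated objective: alternative
-- what changed: Replaced A's _everyN chunking generator and paired while/next-next consumption with a staged table-driven design: first build the whole operation plan arithmetically as (offset, template-id) pairs, then render every operation by direct indexing into the original args through a shared zero-insertion template table (no slicing, no chunk iterator, no alternating consumption).
import Mathlib
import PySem

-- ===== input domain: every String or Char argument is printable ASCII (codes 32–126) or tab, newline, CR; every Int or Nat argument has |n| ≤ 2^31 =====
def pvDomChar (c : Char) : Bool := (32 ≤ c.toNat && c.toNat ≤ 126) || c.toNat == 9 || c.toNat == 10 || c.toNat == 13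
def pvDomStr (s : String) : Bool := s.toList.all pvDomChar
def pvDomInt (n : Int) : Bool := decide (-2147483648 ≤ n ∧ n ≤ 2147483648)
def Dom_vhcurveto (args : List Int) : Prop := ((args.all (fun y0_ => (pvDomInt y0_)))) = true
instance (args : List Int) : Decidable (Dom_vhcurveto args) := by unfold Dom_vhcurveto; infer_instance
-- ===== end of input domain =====

-- B replaces A's _everyN chunking generator and paired while/next-next consumption with a staged
-- table-driven design: build the whole plan of (offset, template-id) pairs arithmetically, then
-- render each operation by direct indexing into args through a zero-insertion template table
-- (objective: alternative decomposition, no speed claim).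
-- Both A and B are Python generators; the ValueError cases (raised on first iteration) are excluded by Pre_.

-- ===== PORT A =====
-- the `while True: args = next(it); yield even; args = next(it); yield odd` loop over _everyN(args, 4):
-- each iteration consumes two 4-groups; StopIteration at either `next` ends the loop.
def vhA_pairs : List Int → List (String × List Int)
  | a0 :: a1 :: a2 :: a3 :: b0 :: b1 :: b2 :: b3 :: rest =>
      ("rrcurveto", [0, a0, a1, a2, a3, 0]) ::
      ("rrcurveto", [b0, 0, b1, b2, 0, b3]) :: vhA_pairs rest
  | a0 :: a1 :: a2 :: a3 :: _ =>
      -- second next(it) raises StopIteration (under Pre_ the leftover here is [])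
      [("rrcurveto", [0, a0, a1, a2, a3, 0])]
  | _ => []

-- tail handling: `args = last_args; if lastStraight: yield ... else: yield ...` (reads args[0]..args[4])
def vhA_last (lastStraight : Bool) (lastArgs : List Int) : List (String × List Int) :=
  match lastArgs with
  | [a0, a1, a2, a3, a4] =>
      if lastStraight then [("rrcurveto", [0, a0, a1, a2, a3, a4])]
      else [("rrcurveto", [a0, 0, a1, a2, a4, a3])]
  | _ => []  -- unreachable under Pre_: the slice args[-5:] has exactly 5 elements there

def vhcurveto (args : List Int) : List (String × List Int) :=
  -- `raise ValueError(args)`: excluded by Pre_vhcurveto, the port returns [] there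
  if args.length < 4 ∨ ¬(args.length % 8 = 0 ∨ args.length % 8 = 1 ∨
      args.length % 8 = 4 ∨ args.length % 8 = 5) then []
  else if args.length % 2 = 1 then
    let lastStraight := args.length % 8 = 5
    let body := PySem.List.slice args none (some (-5))     -- args[:-5]
    let lastArgs := PySem.List.slice args (some (-5)) none -- args[-5:]
    -- `if last_args:` — last_args is the 5-element slice, always truthy here
    vhA_pairs body ++ vhA_last lastStraight lastArgs
  else vhA_pairs args

-- ===== PORT B =====
-- the _TPL tuple of four zero-insertion templates (None ↦ none, an index ↦ some index)
def vhB_tpl (t : Int) : List (Option Int) :=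
  if t = 0 then [none, some 0, some 1, some 2, some 3, none]
  else if t = 1 then [some 0, none, some 1, some 2, none, some 3]
  else if t = 2 then [none, some 0, some 1, some 2, some 3, some 4]
  else [some 0, none, some 1, some 2, some 4, some 3]

-- `('rrcurveto', [0 if j is None else args[off + j] for j in _TPL[t]])`
-- (the index off+j is always in range under Pre_, so pyGetD is exactly args[off+j] there)
def vhB_render (args : List Int) (p : Int × Int) : String × List Int :=
  ("rrcurveto", (vhB_tpl p.2).map (fun j =>
    match j with
    | none => (0 : Int)
    | some j => PySem.List.pyGetD args (p.1 + j) 0))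

def vhcurveto_alt (args : List Int) : List (String × List Int) :=
  let n : Int := args.length
  -- `raise ValueError(args)`: excluded by Pre_vhcurveto, the port returns [] there
  if n < 4 ∨ ¬(PySem.Int.mod n 8 = 0 ∨ PySem.Int.mod n 8 = 1 ∨
      PySem.Int.mod n 8 = 4 ∨ PySem.Int.mod n 8 = 5) then []
  else
    -- Stage 1: `plan = [(4 * i, i % 2) for i in range((n - n % 2 * 5) // 4)]` (+ tail entry if n odd)
    let plan : List (Int × Int) :=
      (PySem.List.pyRange 0 (PySem.Int.floordiv (n - PySem.Int.mod n 2 * 5) 4) 1).map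
        (fun i => (4 * i, PySem.Int.mod i 2))
    let plan := if PySem.Int.mod n 2 ≠ 0 then
        plan ++ [(n - 5, if PySem.Int.mod n 8 = 5 then (2 : Int) else 3)]
      else plan
    -- Stage 2: render each planned operation
    plan.map (vhB_render args)

-- ===== PRECONDITION & SPEC =====
-- Pre_ excludes exactly the inputs on which the Python generators raise ValueError on first iteration.
def Pre_vhcurveto (args : List Int) : Prop :=
  4 ≤ args.length ∧ (args.length % 8 = 0 ∨ args.length % 8 = 1 ∨
    args.length % 8 = 4 ∨ args.length % 8 = 5)
instance (args : List Int) : Decidable (Pre_vhcurveto args) := by unfold Pre_vhcurveto; infer_instance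
def pvWitness_vhcurveto : List Int := [1, 2, 3, 4]

def Spec_vhcurveto (args : List Int) (out : List (String × List Int)) : Prop := out = vhcurveto_alt args
instance (args : List Int) (out : List (String × List Int)) : Decidable (Spec_vhcurveto args out) := by unfold Spec_vhcurveto; infer_instance

-- ===== CLAIM (what is proved, stated in full; the proofs are below) =====
def Claim_equal_vhcurveto : Prop := ∀ (args : List Int), Dom_vhcurveto args → Pre_vhcurveto args → Spec_vhcurveto args (vhcurveto args)

-- ===== LEMMAS AND PROOFS =====

-- proof-internal abstraction: a toggle-loop over 4-groups (used only to relate the two ports)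
def vhLoop (horiz : Bool) : List Int → List (String × List Int)
  | a0 :: a1 :: a2 :: a3 :: rest =>
      (if horiz then ("rrcurveto", [a0, 0, a1, a2, 0, a3])
       else ("rrcurveto", [0, a0, a1, a2, a3, 0])) :: vhLoop (!horiz) rest
  | _ => []

theorem vhA_pairs_eq_vhLoop (xs : List Int) : vhA_pairs xs = vhLoop false xs := by
  induction xs using vhA_pairs.induct with
  | case1 a0 a1 a2 a3 b0 b1 b2 b3 rest ih =>
      simp [vhA_pairs, vhLoop, ih]
  | case2 a0 a1 a2 a3 rest h =>
      cases rest with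
      | nil => simp [vhA_pairs, vhLoop]
      | cons c0 t0 => cases t0 with
        | nil => simp [vhA_pairs, vhLoop]
        | cons c1 t1 => cases t1 with
          | nil => simp [vhA_pairs, vhLoop]
          | cons c2 t2 => cases t2 with
            | nil => simp [vhA_pairs, vhLoop]
            | cons c3 t3 => exact (h c0 c1 c2 c3 t3 rfl).elim
  | case3 xs h8 h4 => cases xs with
      | nil => rfl
      | cons x0 t0 => cases t0 with
        | nil => rfl
        | cons x1 t1 => cases t1 with
          | nil => rfl
          | cons x2 t2 => cases t2 with
            | nil => rfl
            | cons x3 t3 => exact (h4 x0 x1 x2 x3 t3 rfl).elim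

theorem vhGet (args : List Int) (b k : Nat) (hk : b + k < args.length) :
    PySem.List.pyGetD args ((b : Int) + (k : Int)) 0 = args[b + k] := by
  rw [show ((b : Int) + k) = ((b + k : Nat) : Int) by push_cast; ring,
      PySem.List.pyGetD_natCast, List.getD_eq_getElem _ _ hk]

-- B's rendered range plan equals the toggle loop over the corresponding segment of args
theorem vhRender_range (args : List Int) (m s : Nat) (h : 4 * (s + m) ≤ args.length) :
    (PySem.List.pyRange (s : Int) ((s : Int) + m) 1).map
        (fun i => vhB_render args (4 * i, PySem.Int.mod i 2))
      = vhLoop (decide (s % 2 = 1)) ((args.drop (4 * s)).take (4 * m)) := by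
  induction m generalizing s with
  | zero => simp [PySem.List.pyRange_one_eq_nil, vhLoop]
  | succ m ih =>
      rw [PySem.List.pyRange_one_cons (by omega : (s : Int) < (s : Int) + (m + 1 : Nat))]
      have h0 : 4 * s < args.length := by omega
      have h1 : 4 * s + 1 < args.length := by omega
      have h2 : 4 * s + 2 < args.length := by omega
      have h3 : 4 * s + 3 < args.length := by omega
      have hdrop : args.drop (4 * s) =
          args[4 * s] :: args[4 * s + 1] :: args[4 * s + 2] :: args[4 * s + 3] ::
            args.drop (4 * (s + 1)) := by
        rw [List.drop_eq_getElem_cons h0, List.drop_eq_getElem_cons h1,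
            List.drop_eq_getElem_cons h2, List.drop_eq_getElem_cons h3,
            show 4 * s + 1 + 1 + 1 + 1 = 4 * (s + 1) by omega]
      rw [List.map_cons, hdrop]
      have htake : (args[4 * s] :: args[4 * s + 1] :: args[4 * s + 2] :: args[4 * s + 3] ::
          args.drop (4 * (s + 1))).take (4 * (m + 1))
          = args[4 * s] :: args[4 * s + 1] :: args[4 * s + 2] :: args[4 * s + 3] ::
            (args.drop (4 * (s + 1))).take (4 * m) := by
        rw [show 4 * (m + 1) = ((4 * m) + 1 + 1 + 1 + 1) by omega]
        simp [List.take_succ_cons]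
      rw [htake, vhLoop]
      have e0 : PySem.List.pyGetD args (4 * (s : Int) + 0) 0 = args[4 * s] := by
        have := vhGet args (4 * s) 0 (by omega); push_cast at this ⊢; simpa using this
      have e1 : PySem.List.pyGetD args (4 * (s : Int) + 1) 0 = args[4 * s + 1] := by
        have := vhGet args (4 * s) 1 (by omega); push_cast at this ⊢; simpa using this
      have e2 : PySem.List.pyGetD args (4 * (s : Int) + 2) 0 = args[4 * s + 2] := by
        have := vhGet args (4 * s) 2 (by omega); push_cast at this ⊢; simpa using this
      have e3 : PySem.List.pyGetD args (4 * (s : Int) + 3) 0 = args[4 * s + 3] := by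
        have := vhGet args (4 * s) 3 (by omega); push_cast at this ⊢; simpa using this
      have e0' : PySem.List.pyGetD args (4 * (s : Int)) 0 = args[4 * s] := by
        simpa using e0
      congr 1
      · -- head: rendered template at offset 4*s equals the toggle-loop head
        rcases Nat.even_or_odd s with he | ho
        · have hs2 : s % 2 = 0 := Nat.even_iff.mp he
          have hm : PySem.Int.mod (s : Int) 2 = 0 := by
            have := PySem.Int.mod_natCast s 2; push_cast at this; omega
          simp only [vhB_render, hm]
          norm_num [vhB_tpl]
          simp [hs2, e0', e1, e2, e3]
        · have hs2 : s % 2 = 1 := Nat.odd_iff.mp ho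
          have hm : PySem.Int.mod (s : Int) 2 = 1 := by
            have := PySem.Int.mod_natCast s 2; push_cast at this; omega
          simp only [vhB_render, hm]
          norm_num [vhB_tpl]
          simp [hs2, e0', e1, e2, e3]
      · -- tail: shift the range start and apply the induction hypothesis
        rw [show (s : Int) + 1 = ((s + 1 : Nat) : Int) by push_cast; ring,
            show ((s : Nat) : Int) + ((m + 1 : Nat) : Int) = ((s + 1 : Nat) : Int) + (m : Nat) by push_cast; ring,
            ih (s + 1) (by omega)]
        congr 1
        rcases Nat.even_or_odd s with he | ho
        · have : s % 2 = 0 := Nat.even_iff.mp he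
          have h' : (s + 1) % 2 = 1 := by omega
          simp [this, h']
        · have : s % 2 = 1 := Nat.odd_iff.mp ho
          have h' : (s + 1) % 2 = 0 := by omega
          simp [this, h']

-- the rendered tail plan entry equals A's tail yield on the 5-element suffix
theorem vhRender_last (args : List Int) (straight : Bool) (h5 : 5 ≤ args.length) :
    vhB_render args (((args.length : Int) - 5), if straight then 2 else 3)
      = (("rrcurveto",
          if straight then
            [0, args[args.length - 5]'(by omega), args[args.length - 4]'(by omega),
             args[args.length - 3]'(by omega), args[args.length - 2]'(by omega),
             args[args.length - 1]'(by omega)]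
          else
            [args[args.length - 5]'(by omega), 0, args[args.length - 4]'(by omega),
             args[args.length - 3]'(by omega), args[args.length - 1]'(by omega),
             args[args.length - 2]'(by omega)]) : String × List Int) := by
  have e : ∀ (k : Int) (r : Nat), (hr : r < args.length) →
      ((args.length : Int) - 5 + k = (r : Int)) →
      PySem.List.pyGetD args ((args.length : Int) - 5 + k) 0 = args[r] := by
    intro k r hr hkr
    rw [hkr, PySem.List.pyGetD_natCast, List.getD_eq_getElem _ _ hr]
  have f0' : PySem.List.pyGetD args ((args.length : Int) - 5) 0
      = args[args.length - 5]'(by omega) := by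
    simpa using e 0 (args.length - 5) (by omega) (by omega)
  have f1 := e 1 (args.length - 4) (by omega) (by omega)
  have f2 := e 2 (args.length - 3) (by omega) (by omega)
  have f3 := e 3 (args.length - 2) (by omega) (by omega)
  have f4 := e 4 (args.length - 1) (by omega) (by omega)
  cases straight <;>
    · simp only [vhB_render]
      norm_num [vhB_tpl]
      simp [f0', f1, f2, f3, f4]

-- the 5-element suffix slice written out elementwise
theorem vhSuffix (args : List Int) (h5 : 5 ≤ args.length) :
    PySem.List.slice args (some (-5)) none =
      [args[args.length - 5]'(by omega), args[args.length - 4]'(by omega),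
       args[args.length - 3]'(by omega), args[args.length - 2]'(by omega),
       args[args.length - 1]'(by omega)] := by
  rw [PySem.List.slice_from_neg_ofNat args 5 (by omega),
      List.drop_eq_getElem_cons (show args.length - 5 < args.length by omega),
      List.drop_eq_getElem_cons (show args.length - 5 + 1 < args.length by omega),
      List.drop_eq_getElem_cons (show args.length - 5 + 1 + 1 < args.length by omega),
      List.drop_eq_getElem_cons (show args.length - 5 + 1 + 1 + 1 < args.length by omega),
      List.drop_eq_getElem_cons (show args.length - 5 + 1 + 1 + 1 + 1 < args.length by omega),
      List.drop_eq_nil_of_le (show args.length ≤ args.length - 5 + 1 + 1 + 1 + 1 + 1 by omega)]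
  simp only [show args.length - 5 + 1 = args.length - 4 from by omega,
    show args.length - 4 + 1 = args.length - 3 from by omega,
    show args.length - 3 + 1 = args.length - 2 from by omega,
    show args.length - 2 + 1 = args.length - 1 from by omega]

-- the range-built plan at start 0, in the composed form List.map_map leaves
theorem vhRender_range0 (args : List Int) (m : Nat) (h : 4 * m ≤ args.length) :
    (PySem.List.pyRange 0 (m : Int) 1).map
        (vhB_render args ∘ fun i => (4 * i, PySem.Int.mod i 2))
      = vhLoop false (args.take (4 * m)) := by
  have hr := vhRender_range args m 0 (by omega)
  rw [show (((0 : Nat) : Int) + (m : Int)) = (m : Int) by push_cast; ring] at hr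
  exact hr

-- ===== VERDICT (by name: the statement is the Claim_ definition above) =====
theorem vhcurveto_spec : Claim_equal_vhcurveto := by
  intro args _ hpre
  obtain ⟨h4, h8⟩ := hpre
  have hm8 : PySem.Int.mod ((args.length : Int)) 8 = ((args.length % 8 : Nat) : Int) := by
    simp
  have hm2 : PySem.Int.mod ((args.length : Int)) 2 = ((args.length % 2 : Nat) : Int) := by
    simp
  unfold Spec_vhcurveto vhcurveto vhcurveto_alt
  simp only [hm8, hm2]
  rw [if_neg (by omega : ¬(args.length < 4 ∨ ¬(args.length % 8 = 0 ∨ args.length % 8 = 1 ∨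
        args.length % 8 = 4 ∨ args.length % 8 = 5))),
      if_neg (by push_cast; omega : ¬(((args.length : Int)) < 4 ∨
        ¬(((args.length % 8 : Nat) : Int) = 0 ∨ ((args.length % 8 : Nat) : Int) = 1 ∨
          ((args.length % 8 : Nat) : Int) = 4 ∨ ((args.length % 8 : Nat) : Int) = 5)))]
  by_cases hodd : args.length % 2 = 1
  · -- odd length: a body of 4-groups plus the 5-element tail
    have h5 : 5 ≤ args.length := by omega
    rw [if_pos hodd, if_pos (by push_cast; omega : ¬((args.length % 2 : Nat) : Int) = 0)]
    have hdiv : PySem.Int.floordiv ((args.length : Int) - ((args.length % 2 : Nat) : Int) * 5) 4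
        = (((args.length - 5) / 4 : Nat) : Int) := by
      rw [show ((args.length : Int) - ((args.length % 2 : Nat) : Int) * 5)
            = (((args.length - 5 : Nat)) : Int) by push_cast; omega]
      simp
    rw [hdiv, List.map_append, List.map_map,
        vhRender_range0 args ((args.length - 5) / 4) (by omega),
        show 4 * ((args.length - 5) / 4) = args.length - 5 by omega]
    congr 1
    · -- body
      rw [PySem.List.slice_to_neg_ofNat args 5 (by omega), vhA_pairs_eq_vhLoop]
    · -- tail
      rw [vhSuffix args h5, List.map_cons, List.map_nil]
      by_cases hs : args.length % 8 = 5
      · rw [if_pos (by omega : ((args.length % 8 : Nat) : Int) = 5)]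
        have ht := vhRender_last args true h5
        norm_num at ht
        rw [ht]
        simp [vhA_last, hs]
      · rw [if_neg (by omega : ¬((args.length % 8 : Nat) : Int) = 5)]
        have hf := vhRender_last args false h5
        norm_num at hf
        rw [hf]
        simp [vhA_last, hs]
  · -- even length: only the alternating 4-group body
    rw [if_neg hodd, if_neg (by push_cast; omega : ¬¬((args.length % 2 : Nat) : Int) = 0)]
    have hdiv : PySem.Int.floordiv ((args.length : Int) - ((args.length % 2 : Nat) : Int) * 5) 4
        = ((args.length / 4 : Nat) : Int) := by
      rw [show ((args.length : Int) - ((args.length % 2 : Nat) : Int) * 5)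
            = ((args.length : Nat) : Int) by push_cast; omega]
      simp
    rw [hdiv, List.map_map, vhRender_range0 args (args.length / 4) (by omega),
        show 4 * (args.length / 4) = args.length by omega,
        List.take_of_length_le (le_refl _), vhA_pairs_eq_vhLoop]
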